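-- pv_equiv track=rewrite | github.com/yuelfei/NNBA | boundary_assembly_Lite/yuefei_utils.py | all_index_match
-- ===== SOURCE A (Python) =====
-- def all_index_match(word):
--
--     total_match_word=[]
--     total_sentence_order=[]
--     for word_list in word:
--
--         match_word = []
--         single_word_temp=[]
--         start_temp = []
--         end_temp = []
--         sentence_order = []
--
--         for a_node in range(len(word_list)):
--             for b_node in range(len(word_list)):
--                 if (a_node < b_node):
--                     sentence_order.append([a_node, b_node])
--
--         for index_node in sentence_order:
--             start_index = index_node[0]
--             end_index = index_node[-1]
--             single_word_temp.append(word_list[:start_index+1])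
--             single_word_temp.append(word_list[start_index:])
--             single_word_temp.append(word_list[:end_index+1])
--             single_word_temp.append(word_list[end_index:])
--             match_word.append(single_word_temp)
--             single_word_temp=[]
--         total_match_word.append(match_word)
--         match_word=[]
--         total_sentence_order.append(sentence_order)
--         sentence_order=[]
--
--     return total_match_word,total_sentence_order
-- ===== SOURCE B (Python) =====
-- def all_index_match(word):
--     total_match_word = []
--     total_sentence_order = []
--     for word_list in word:
--         n = len(word_list)
--         # precompute prefix/suffix tables once; pairs then only look them up
--         pref = [word_list[:i + 1] for i in range(n)]
--         suf = [word_list[i:] for i in range(n)]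
--         sentence_order = []
--         match_word = []
--         for a in range(n):
--             for b in range(a + 1, n):
--                 sentence_order.append([a, b])
--                 match_word.append([pref[a], suf[a], pref[b], suf[b]])
--         total_match_word.append(match_word)
--         total_sentence_order.append(sentence_order)
--     return total_match_word, total_sentence_order
-- ===== Notes on version B (the rewrite author's own statement) =====
-- stated objective: alternative
-- what changed: Precomputes per-word-list prefix/suffix slice tables once and looks pairs up in them inside a single merged a<b loop that fills sentence_order and match_word together, replacing A's staged passes (an n*n filtered pair scan, then a second loop re-slicing the list four times per pair).
import Mathlib
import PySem

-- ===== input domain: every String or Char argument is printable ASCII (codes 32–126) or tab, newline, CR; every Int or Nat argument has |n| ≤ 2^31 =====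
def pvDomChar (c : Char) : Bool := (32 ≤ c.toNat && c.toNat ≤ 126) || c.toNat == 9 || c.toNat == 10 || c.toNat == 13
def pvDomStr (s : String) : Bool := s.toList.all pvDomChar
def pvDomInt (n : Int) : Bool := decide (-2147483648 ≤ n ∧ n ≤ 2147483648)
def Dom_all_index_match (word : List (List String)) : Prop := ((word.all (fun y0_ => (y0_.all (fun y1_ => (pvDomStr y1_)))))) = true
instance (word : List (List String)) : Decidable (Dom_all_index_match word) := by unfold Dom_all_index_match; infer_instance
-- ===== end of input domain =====

-- B precomputes prefix/suffix slice tables once per word list and fills sentence_order and match_word in a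
-- single merged a<b loop of table lookups, instead of A's staged passes that re-slice per pair (objective:
-- alternative; return-value equivalence only — B's output shares sublist objects where A copies them afresh).

-- ===== PORT A =====
def all_index_match (word : List (List String)) : List (List (List (List String))) × List (List (List Int)) :=
  word.foldl (fun acc word_list =>
    let n : Int := word_list.length
    let sentence_order : List (List Int) :=
      (PySem.List.pyRange 0 n 1).foldl (fun so a_node =>
        (PySem.List.pyRange 0 n 1).foldl (fun so b_node =>
          if a_node < b_node then so ++ [[a_node, b_node]] else so) so) []
    let match_word : List (List (List String)) :=
      sentence_order.foldl (fun mw index_node =>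
        -- index_node is always [a, b] here, so index_node[0] / index_node[-1] never raise
        let start_index := (PySem.List.pyGet? index_node 0).getD 0
        let end_index := (PySem.List.pyGet? index_node (-1)).getD 0
        mw ++ [[PySem.List.slice word_list none (some (start_index + 1)),
                PySem.List.slice word_list (some start_index) none,
                PySem.List.slice word_list none (some (end_index + 1)),
                PySem.List.slice word_list (some end_index) none]]) []
    (acc.1 ++ [match_word], acc.2 ++ [sentence_order])) ([], [])

-- ===== PORT B =====
def all_index_match_alt (word : List (List String)) : List (List (List (List String))) × List (List (List Int)) :=
  word.foldl (fun acc word_list =>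
    let n : Int := word_list.length
    let pref : List (List String) :=
      (PySem.List.pyRange 0 n 1).map (fun i => PySem.List.slice word_list none (some (i + 1)))
    let suf : List (List String) :=
      (PySem.List.pyRange 0 n 1).map (fun i => PySem.List.slice word_list (some i) none)
    -- merged loop: one fold over a, inner fold over b, pair accumulator (sentence_order, match_word);
    -- pref[a]/suf[a]/pref[b]/suf[b] are in-range table lookups, ported as pyGetD with an unused default
    let st : List (List Int) × List (List (List String)) :=
      (PySem.List.pyRange 0 n 1).foldl (fun st a =>
        (PySem.List.pyRange (a + 1) n 1).foldl (fun st b =>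
          (st.1 ++ [[a, b]],
           st.2 ++ [[PySem.List.pyGetD pref a [], PySem.List.pyGetD suf a [],
                     PySem.List.pyGetD pref b [], PySem.List.pyGetD suf b []]])) st) ([], [])
    (acc.1 ++ [st.2], acc.2 ++ [st.1])) ([], [])

-- ===== PRECONDITION & SPEC =====
def Spec_all_index_match (word : List (List String)) (out : List (List (List (List String))) × List (List (List Int))) : Prop := out = all_index_match_alt word
instance (word : List (List String)) (out : List (List (List (List String))) × List (List (List Int))) : Decidable (Spec_all_index_match word out) := by unfold Spec_all_index_match; infer_instance

-- ===== CLAIM (what is proved, stated in full; the proofs are below) =====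
def Claim_equal_all_index_match : Prop := ∀ (word : List (List String)), Dom_all_index_match word → Spec_all_index_match word (all_index_match word)

-- ===== LEMMAS AND PROOFS =====

-- A's filtered inner scan over the whole range picks out exactly range(a+1, n)
lemma filter_lt_pyRange (a n : Int) (ha : 0 ≤ a) :
    (PySem.List.pyRange 0 n 1).filter (fun b => a < b) = PySem.List.pyRange (a + 1) n 1 := by
  by_cases h : a + 1 ≤ n
  · rw [PySem.List.pyRange_one_append 0 (a + 1) n (by omega) h, List.filter_append]
    have h1 : (PySem.List.pyRange 0 (a + 1) 1).filter (fun b => a < b) = [] := by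
      rw [List.filter_eq_nil_iff]
      intro x hx
      have := PySem.List.mem_pyRange_one.mp hx
      simp only [decide_eq_true_eq]
      omega
    have h2 : (PySem.List.pyRange (a + 1) n 1).filter (fun b => a < b) =
        PySem.List.pyRange (a + 1) n 1 := by
      rw [List.filter_eq_self]
      intro x hx
      have := PySem.List.mem_pyRange_one.mp hx
      simp only [decide_eq_true_eq]
      omega
    rw [h1, h2, List.nil_append]
  · rw [PySem.List.pyRange_one_eq_nil (by omega : n ≤ a + 1), List.filter_eq_nil_iff]
    intro x hx
    have := PySem.List.mem_pyRange_one.mp hx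
    simp only [decide_eq_true_eq]
    omega

-- the lexicographic pair list both programs produce
def soB (wl : List String) : List (List Int) :=
  (PySem.List.pyRange 0 (wl.length : Int) 1).flatMap (fun a =>
    (PySem.List.pyRange (a + 1) (wl.length : Int) 1).map (fun b => [a, b]))

-- A's pair-building double loop equals the flatMap form
lemma pairs_eq (n : Int) :
    (PySem.List.pyRange 0 n 1).foldl (fun so a_node =>
      (PySem.List.pyRange 0 n 1).foldl (fun so b_node =>
        if a_node < b_node then so ++ [[a_node, b_node]] else so) so) [] =
    (PySem.List.pyRange 0 n 1).flatMap (fun a =>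
      (PySem.List.pyRange (a + 1) n 1).map (fun b => [a, b])) := by
  have step : ∀ a : Int, 0 ≤ a → ∀ so : List (List Int),
      (PySem.List.pyRange 0 n 1).foldl (fun so b_node =>
        if a < b_node then so ++ [[a, b_node]] else so) so =
      so ++ (PySem.List.pyRange (a + 1) n 1).map (fun b => [a, b]) := by
    intro a ha so
    have hfun : (fun (so : List (List Int)) b => if a < b then so ++ [[a, b]] else so) =
        (fun so b => if (fun b => decide (a < b)) b = true then so ++ [[a, b]] else so) := by
      funext so b; by_cases hab : a < b <;> simp [hab]
    rw [hfun, PySem.List.foldl_append_if (fun b => decide (a < b)) (fun b => [a, b]),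
      filter_lt_pyRange a n ha]
  rw [PySem.List.foldl_congr_mem _ _ (fun so a =>
      so ++ (PySem.List.pyRange (a + 1) n 1).map (fun b => [a, b])) []
      (fun so a hmem => step a (PySem.List.mem_pyRange_one.mp hmem).1 so)]
  exact PySem.List.foldl_append_eq_flatMap _ _ []

-- A-side per-word_list values, named for the proofs
def soA (wl : List String) : List (List Int) :=
  (PySem.List.pyRange 0 (wl.length : Int) 1).foldl (fun so a_node =>
    (PySem.List.pyRange 0 (wl.length : Int) 1).foldl (fun so b_node =>
      if a_node < b_node then so ++ [[a_node, b_node]] else so) so) []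

def mwA (wl : List String) : List (List (List String)) :=
  (soA wl).foldl (fun mw index_node =>
    let start_index := (PySem.List.pyGet? index_node 0).getD 0
    let end_index := (PySem.List.pyGet? index_node (-1)).getD 0
    mw ++ [[PySem.List.slice wl none (some (start_index + 1)),
            PySem.List.slice wl (some start_index) none,
            PySem.List.slice wl none (some (end_index + 1)),
            PySem.List.slice wl (some end_index) none]]) []

-- B-side tables and per-word_list state
def prefT (wl : List String) : List (List String) :=
  (PySem.List.pyRange 0 (wl.length : Int) 1).map (fun i => PySem.List.slice wl none (some (i + 1)))

def sufT (wl : List String) : List (List String) :=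
  (PySem.List.pyRange 0 (wl.length : Int) 1).map (fun i => PySem.List.slice wl (some i) none)

def stB (wl : List String) : List (List Int) × List (List (List String)) :=
  (PySem.List.pyRange 0 (wl.length : Int) 1).foldl (fun st a =>
    (PySem.List.pyRange (a + 1) (wl.length : Int) 1).foldl (fun st b =>
      (st.1 ++ [[a, b]],
       st.2 ++ [[PySem.List.pyGetD (prefT wl) a [], PySem.List.pyGetD (sufT wl) a [],
                 PySem.List.pyGetD (prefT wl) b [], PySem.List.pyGetD (sufT wl) b []]])) st) ([], [])

-- generic: a fold appending one element to each side of a pair accumulator is a pair of maps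
lemma foldl_prod_append {α β γ : Type} (F : α → β) (G : α → γ) (l : List α)
    (x : List β) (y : List γ) :
    l.foldl (fun acc wl => (acc.1 ++ [F wl], acc.2 ++ [G wl])) (x, y) =
    (x ++ l.map F, y ++ l.map G) := by
  induction l generalizing x y with
  | nil => simp
  | cons h t ih => simp [ih]

-- generic: a fold appending a whole list to each side of a pair accumulator is a pair of flatMaps
lemma foldl_prod_append_flat {α β γ : Type} (F : α → List β) (G : α → List γ) (l : List α)
    (x : List β) (y : List γ) :
    l.foldl (fun acc a => (acc.1 ++ F a, acc.2 ++ G a)) (x, y) =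
    (x ++ l.flatMap F, y ++ l.flatMap G) := by
  induction l generalizing x y with
  | nil => simp
  | cons h t ih => simp [ih]

-- the table lookups recover the slices for in-range indices
lemma prefT_lookup (wl : List String) (i : Int) (h0 : 0 ≤ i) (h1 : i < (wl.length : Int)) :
    PySem.List.pyGetD (prefT wl) i [] = PySem.List.slice wl none (some (i + 1)) :=
  PySem.List.pyGetD_map_pyRange_of_nonneg _ _ _ _ h0 h1

lemma sufT_lookup (wl : List String) (i : Int) (h0 : 0 ≤ i) (h1 : i < (wl.length : Int)) :
    PySem.List.pyGetD (sufT wl) i [] = PySem.List.slice wl (some i) none :=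
  PySem.List.pyGetD_map_pyRange_of_nonneg _ _ _ _ h0 h1

-- B's merged fold splits into the pair list and the slice-quadruple list
lemma stB_eq (wl : List String) :
    stB wl = (soB wl,
      (soB wl).map (fun q =>
        match q with
        | [a, b] => [PySem.List.slice wl none (some (a + 1)),
                     PySem.List.slice wl (some a) none,
                     PySem.List.slice wl none (some (b + 1)),
                     PySem.List.slice wl (some b) none]
        | _ => [])) := by
  unfold stB
  have hinner : ∀ a : Int, 0 ≤ a → ∀ st : List (List Int) × List (List (List String)),
      (PySem.List.pyRange (a + 1) (wl.length : Int) 1).foldl (fun st b =>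
        (st.1 ++ [[a, b]],
         st.2 ++ [[PySem.List.pyGetD (prefT wl) a [], PySem.List.pyGetD (sufT wl) a [],
                   PySem.List.pyGetD (prefT wl) b [], PySem.List.pyGetD (sufT wl) b []]])) st =
      (st.1 ++ (PySem.List.pyRange (a + 1) (wl.length : Int) 1).map (fun b => [a, b]),
       st.2 ++ (PySem.List.pyRange (a + 1) (wl.length : Int) 1).map (fun b =>
         [PySem.List.slice wl none (some (a + 1)), PySem.List.slice wl (some a) none,
          PySem.List.slice wl none (some (b + 1)), PySem.List.slice wl (some b) none])) := by
    intro a ha st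
    obtain ⟨x, y⟩ := st
    rw [foldl_prod_append (fun b => [a, b])
      (fun b => [PySem.List.pyGetD (prefT wl) a [], PySem.List.pyGetD (sufT wl) a [],
                 PySem.List.pyGetD (prefT wl) b [], PySem.List.pyGetD (sufT wl) b []])]
    refine Prod.ext rfl ?_
    simp only []
    congr 1
    apply List.map_congr_left
    intro b hb
    have hbm := PySem.List.mem_pyRange_one.mp hb
    have han : a < (wl.length : Int) := by omega
    rw [prefT_lookup wl a ha han, sufT_lookup wl a ha han,
        prefT_lookup wl b (by omega) hbm.2, sufT_lookup wl b (by omega) hbm.2]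
  rw [PySem.List.foldl_congr_mem _ _ (fun st a =>
      (st.1 ++ (PySem.List.pyRange (a + 1) (wl.length : Int) 1).map (fun b => [a, b]),
       st.2 ++ (PySem.List.pyRange (a + 1) (wl.length : Int) 1).map (fun b =>
         [PySem.List.slice wl none (some (a + 1)), PySem.List.slice wl (some a) none,
          PySem.List.slice wl none (some (b + 1)), PySem.List.slice wl (some b) none])))
      ([], [])
      (fun st a hmem => hinner a (PySem.List.mem_pyRange_one.mp hmem).1 st)]
  rw [foldl_prod_append_flat]
  refine Prod.ext rfl ?_
  simp only [soB, List.map_flatMap, List.map_map, List.nil_append]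
  rfl

lemma soA_eq (wl : List String) : soA wl = soB wl := pairs_eq (wl.length : Int)

lemma mwA_eq (wl : List String) : mwA wl = (stB wl).2 := by
  rw [stB_eq]
  unfold mwA
  rw [soA_eq, PySem.List.foldl_append_singleton_eq_map, List.nil_append]
  apply List.map_congr_left
  intro q hq
  rcases List.mem_flatMap.mp hq with ⟨a, _, hq2⟩
  rcases List.mem_map.mp hq2 with ⟨b, _, rfl⟩
  rfl

-- ===== VERDICT (by name: the statement is the Claim_ definition above) =====
theorem all_index_match_spec : Claim_equal_all_index_match := by
  intro word _
  show all_index_match word = all_index_match_alt word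
  have hA : all_index_match word = (word.map mwA, word.map soA) := by
    rw [show all_index_match word =
          word.foldl (fun acc wl => (acc.1 ++ [mwA wl], acc.2 ++ [soA wl])) ([], []) from rfl,
        foldl_prod_append]
    simp
  have hB : all_index_match_alt word =
      (word.map (fun wl => (stB wl).2), word.map (fun wl => (stB wl).1)) := by
    rw [show all_index_match_alt word =
          word.foldl (fun acc wl => (acc.1 ++ [(stB wl).2], acc.2 ++ [(stB wl).1])) ([], []) from rfl,
        foldl_prod_append]
    simp
  rw [hA, hB]
  refine Prod.ext ?_ ?_ <;> simp only []
  · exact List.map_congr_left (fun wl _ => mwA_eq wl)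
  · exact List.map_congr_left (fun wl _ => by rw [soA_eq wl, stB_eq])
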